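-- pv_equiv track=rewrite | github.com/3b33/MiscPython | Mooc_Tietorakenteet_ja_algoritmit/vk2/vk02_004.py | splitsToSameSumCount2
-- ===== SOURCE A (Python) =====
-- def splitsToSameSumCount2(l):
--     sum1 = l[0]
--     sum2 = sum(l[1:])
--     c = 0 # count
--     for i in range(1,len(l)):
--         if sum1 == sum2: c += 1
--         sum1 += l[i]
--         sum2 -= l[i]
--     return c
-- ===== SOURCE B (Python) =====
-- def splitsToSameSumCount2(l):
--     total = sum(l)
--     seen = {}
--     s = 0
--     for x in l[:-1]:
--         s += x
--         seen[2 * s] = seen.get(2 * s, 0) + 1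
--     return seen.get(total, 0)
-- ===== Notes on version B (the rewrite author's own statement) =====
-- stated objective: alternative
-- what changed: B builds a histogram dictionary of doubled prefix sums and reads the answer with a single lookup of the total, instead of A's loop that incrementally maintains two running sums and compares them at every index.
import Mathlib
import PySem

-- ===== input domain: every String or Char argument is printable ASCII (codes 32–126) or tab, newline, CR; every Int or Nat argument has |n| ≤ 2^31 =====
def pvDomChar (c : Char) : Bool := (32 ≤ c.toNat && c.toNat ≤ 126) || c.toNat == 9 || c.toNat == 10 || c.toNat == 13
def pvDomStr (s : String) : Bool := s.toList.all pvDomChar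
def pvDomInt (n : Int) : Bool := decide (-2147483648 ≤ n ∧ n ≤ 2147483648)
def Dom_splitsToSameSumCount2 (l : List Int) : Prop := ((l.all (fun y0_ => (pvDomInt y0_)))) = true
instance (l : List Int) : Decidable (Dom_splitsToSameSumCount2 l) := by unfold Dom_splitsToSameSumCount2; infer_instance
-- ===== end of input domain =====

-- B builds a histogram dictionary of doubled prefix sums and reads the answer with a single
-- lookup of the total, instead of A's per-index comparison of two running sums (alternative).


-- ===== PORT A =====
-- one step of A's loop body: test, then update both running sums
def stepA (s : Int × Int × Int) (x : Int) : Int × Int × Int :=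
  (s.1 + x, s.2.1 - x, if s.1 = s.2.1 then s.2.2 + 1 else s.2.2)

def splitsToSameSumCount2 (l : List Int) : Int :=
  let sum1 := PySem.List.pyGetD l 0 0          -- A's first-element access; in range by Pre_ (l ≠ [])
  let sum2 := (PySem.List.slice l (some 1) none).sum
  let r := (PySem.List.pyRange 1 (l.length : Int) 1).foldl
    (fun s j => stepA s (PySem.List.pyGetD l j 0)) (sum1, sum2, (0 : Int))
  r.2.2

-- ===== PORT B =====
-- one step of B's loop body: advance the running sum, bump the histogram at the doubled sum
def stepB (p : PySem.Dict Int Int × Int) (x : Int) : PySem.Dict Int Int × Int :=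
  let s := p.2 + x
  (p.1.insert (2 * s) (p.1.getD (2 * s) 0 + 1), s)

def splitsToSameSumCount2_alt (l : List Int) : Int :=
  let total := l.sum
  let r := (PySem.List.slice l none (some (-1))).foldl stepB (PySem.Dict.empty, 0)
  r.1.getD total 0

-- ===== PRECONDITION & SPEC =====
-- Pre_ excludes exactly the empty list, on which A raises IndexError at its first-element access.
def Pre_splitsToSameSumCount2 (l : List Int) : Prop := l ≠ []
instance (l : List Int) : Decidable (Pre_splitsToSameSumCount2 l) := by unfold Pre_splitsToSameSumCount2; infer_instance

def pvWitness_splitsToSameSumCount2 : List Int := [1, 2, 3, 3, 2, 1]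

def Spec_splitsToSameSumCount2 (l : List Int) (out : Int) : Prop := out = splitsToSameSumCount2_alt l
instance (l : List Int) (out : Int) : Decidable (Spec_splitsToSameSumCount2 l out) := by unfold Spec_splitsToSameSumCount2; infer_instance

-- ===== CLAIM (what is proved, stated in full; the proofs are below) =====
def Claim_equal_splitsToSameSumCount2 : Prop := ∀ (l : List Int), Dom_splitsToSameSumCount2 l → Pre_splitsToSameSumCount2 l → Spec_splitsToSameSumCount2 l (splitsToSameSumCount2 l)

-- ===== LEMMAS AND PROOFS =====

-- running prefix sums of a list starting from s
def prefList (s : Int) : List Int → List Int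
  | [] => []
  | x :: t => (s + x) :: prefList (s + x) t

-- A's loop: the final count is the number of indices j with sum1+pref = sum2-pref
theorem foldA_eq (t : List Int) : ∀ (s1 s2 c : Int),
    (t.foldl stepA (s1, s2, c)).2.2
      = c + ((List.range t.length).countP
          (fun j => decide (s1 + (t.take j).sum = s2 - (t.take j).sum)) : Int) := by
  induction t with
  | nil => intro s1 s2 c; simp
  | cons x t ih =>
      intro s1 s2 c
      rw [List.foldl_cons]
      show ((t.foldl stepA (s1 + x, s2 - x, if s1 = s2 then c + 1 else c)).2.2) = _
      rw [ih]
      simp only [List.length_cons, List.range_succ_eq_map, List.countP_cons, List.countP_map]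
      have hcongr : (List.range t.length).countP
            ((fun j => decide (s1 + ((x :: t).take j).sum = s2 - ((x :: t).take j).sum)) ∘ (· + 1))
          = (List.range t.length).countP
            (fun j => decide (s1 + x + (t.take j).sum = s2 - x - (t.take j).sum)) := by
        apply List.countP_congr
        intro j _
        simp only [Function.comp, List.take_succ_cons, List.sum_cons]
        constructor <;> (intro h; simp only [decide_eq_true_eq] at h ⊢; omega)
      rw [hcongr]
      by_cases h : s1 = s2 <;> simp [h] <;> ring

-- B's loop IS the histogram-insert loop over the doubled prefix sums
theorem foldB_eq (u : List Int) : ∀ (d : PySem.Dict Int Int) (s : Int),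
    u.foldl stepB (d, s)
      = (((prefList s u).map (fun w => 2 * w)).foldl
          (fun d k => d.insert k (d.getD k 0 + 1)) d, s + u.sum) := by
  induction u with
  | nil => intro d s; simp [prefList]
  | cons x t ih =>
      intro d s
      rw [List.foldl_cons]
      show t.foldl stepB (d.insert (2 * (s + x)) (d.getD (2 * (s + x)) 0 + 1), s + x) = _
      rw [ih]
      simp only [prefList, List.map_cons, List.foldl_cons, List.sum_cons, add_assoc]

-- the histogram count of v over the doubled prefixes, as a countP over indices
theorem countPref (u : List Int) : ∀ (s v : Int),
    ((prefList s u).map (fun w => 2 * w)).count v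
      = (List.range u.length).countP (fun j => decide (2 * (s + (u.take (j + 1)).sum) = v)) := by
  induction u with
  | nil => intro s v; simp [prefList]
  | cons x t ih =>
      intro s v
      simp only [prefList, List.map_cons, List.count_cons, List.length_cons,
        List.range_succ_eq_map, List.countP_cons, List.countP_map]
      have hcongr : (List.range t.length).countP
            ((fun j => decide (2 * (s + ((x :: t).take (j + 1)).sum) = v)) ∘ (· + 1))
          = (List.range t.length).countP (fun j => decide (2 * (s + x + (t.take (j + 1)).sum) = v)) := by
        apply List.countP_congr
        intro j _
        simp only [Function.comp, List.take_succ_cons, List.sum_cons]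
        constructor <;> (intro h; simp only [decide_eq_true_eq] at h ⊢; omega)
      rw [ih, hcongr]
      simp only [zero_add, List.take_succ_cons, List.take_zero, List.sum_cons, List.sum_nil,
        add_zero]
      by_cases h : 2 * (s + x) = v <;> simp [h]

theorem splitsToSameSumCount2_spec : Claim_equal_splitsToSameSumCount2 := by
  intro l _ hpre
  unfold Spec_splitsToSameSumCount2 splitsToSameSumCount2 splitsToSameSumCount2_alt
  obtain ⟨a, t, rfl⟩ : ∃ a t, l = a :: t := by
    cases l with
    | nil => exact absurd rfl hpre
    | cons a t => exact ⟨a, t, rfl⟩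
  -- A side
  have hA : (PySem.List.pyRange 1 ((a :: t).length : Int) 1).foldl
      (fun s j => stepA s (PySem.List.pyGetD (a :: t) j 0))
      (PySem.List.pyGetD (a :: t) 0 0, (PySem.List.slice (a :: t) (some 1) none).sum, (0 : Int))
      = t.foldl stepA (a, t.sum, 0) := by
    rw [PySem.List.foldl_pyRange_pyGetD' (a :: t) 0 stepA _ (by omega)]
    simp [PySem.List.slice_from_one, PySem.List.pyGetD_zero_cons]
  simp only [hA, foldA_eq, zero_add]
  -- B side
  rw [PySem.List.slice_to_neg_one, foldB_eq]
  rw [PySem.Dict.getD_foldl_insert_add_one, PySem.Dict.getD_empty, countPref, zero_add]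
  have hlen : (a :: t).dropLast.length = t.length := by simp
  rw [hlen]
  congr 1
  apply List.countP_congr
  intro j hj
  rw [List.mem_range] at hj
  have htake : (a :: t).dropLast.take (j + 1) = a :: t.take j := by
    rw [List.dropLast_eq_take, List.take_take]
    have : min (j + 1) ((a :: t).length - 1) = j + 1 := by simp; omega
    rw [this]
    simp
  rw [htake]
  simp only [List.sum_cons, List.sum_cons, decide_eq_true_eq]
  constructor <;> intro h <;> omega
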